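-- pv_equiv track=rewrite | github.com/cetinye/WHED_Scrapper | txt_to_excel.py | choose_preferred_id
-- ===== SOURCE A (Python) =====
-- def choose_preferred_id(values: list[object]) -> object | None:
--     unique_values: list[object] = []
--     seen: set[object] = set()
--     for value in values:
--         if value is None or value in seen:
--             continue
--         seen.add(value)
--         unique_values.append(value)
--
--     if not unique_values:
--         return None
--
--     numeric_values: list[tuple[int, object]] = []
--     for value in unique_values:
--         try:
--             numeric_values.append((int(value), value))
--         except (TypeError, ValueError):
--             continue
--
--     if numeric_values:
--         return max(numeric_values, key=lambda item: item[0])[1]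
--
--     return unique_values[-1]
-- ===== SOURCE B (Python) =====
-- def choose_preferred_id(values: list[object]) -> object | None:
--     seen: set[object] = set()
--     last_unique = None
--     best = None  # (best_int, best_value)
--     for value in values:
--         if value is None or value in seen:
--             continue
--         seen.add(value)
--         last_unique = value
--         try:
--             n = int(value)
--         except (TypeError, ValueError):
--             continue
--         if best is None or n > best[0]:
--             best = (n, value)
--     if best is not None:
--         return best[1]
--     return last_unique
-- ===== Notes on version B (the rewrite author's own statement) =====
-- stated objective: simpler
-- what changed: A's three sequential passes (dedup loop building a unique list, a second loop building (int,value) pairs, then max) are fused into one loop that maintains a seen set, the last unique value and the running best (int,value) pair with a strict > update so the first value at the maximal int wins, as in Python's max.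
import Mathlib
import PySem

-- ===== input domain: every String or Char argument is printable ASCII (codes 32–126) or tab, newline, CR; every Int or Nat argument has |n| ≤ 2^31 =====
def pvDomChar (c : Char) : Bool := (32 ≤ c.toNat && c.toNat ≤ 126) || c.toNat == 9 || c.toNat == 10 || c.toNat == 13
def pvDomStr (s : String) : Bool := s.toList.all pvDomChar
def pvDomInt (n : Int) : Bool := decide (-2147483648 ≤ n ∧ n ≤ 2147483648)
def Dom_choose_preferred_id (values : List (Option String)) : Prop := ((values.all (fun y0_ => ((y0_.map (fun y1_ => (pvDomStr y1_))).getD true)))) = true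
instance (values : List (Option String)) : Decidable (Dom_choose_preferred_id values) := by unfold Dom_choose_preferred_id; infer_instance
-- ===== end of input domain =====

-- B replaces A's three sequential passes (dedup loop, numeric-pairs loop, max) by ONE loop
-- that maintains a seen-set, the last unique value and the running best numeric pair (simpler).

-- ===== PORT A =====
-- step of A's first loop: skip None and already-seen values, else record as unique
def pvUniqStep (st : PySem.Set String × List String) (value : Option String) :
    PySem.Set String × List String :=
  match value with
  | none => st
  | some v => if PySem.Set.contains st.1 v then st else (PySem.Set.add st.1 v, st.2 ++ [v])

-- step of A's second loop: try int(value) and append the pair, else continue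
def pvNumStep (acc : List (Int × String)) (v : String) : List (Int × String) :=
  match PySem.Int.ofStr? v with
  | some n => acc ++ [(n, v)]
  | none => acc

def choose_preferred_id (values : List (Option String)) : Option String :=
  let unique_values := (values.foldl pvUniqStep ((PySem.Set.empty : PySem.Set String), [])).2
  if unique_values = [] then none
  else
    let numeric_values := unique_values.foldl pvNumStep []
    if numeric_values ≠ [] then
      match PySem.List.max? numeric_values (fun item => item.1) with
      | some item => some item.2
      | none => none  -- unreachable: numeric_values ≠ [] in this branch
    else
      PySem.List.pyGet? unique_values (-1)  -- unique_values[-1]; here unique_values ≠ []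

-- ===== PORT B =====
-- best-update of Source B's loop body: n = int(value); update best when best is None or n > best[0]
def pvBestUpd (best : Option (Int × String)) (v : String) : Option (Int × String) :=
  match PySem.Int.ofStr? v with
  | some n =>
    match best with
    | none => some (n, v)
    | some b => if n > b.1 then some (n, v) else best
  | none => best

-- one iteration of Source B's single loop over (seen, last_unique, best)
def pvAltStep (st : PySem.Set String × Option String × Option (Int × String))
    (value : Option String) : PySem.Set String × Option String × Option (Int × String) :=
  match value with
  | none => st
  | some v =>
    if PySem.Set.contains st.1 v then st
    else (PySem.Set.add st.1 v, some v, pvBestUpd st.2.2 v)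

def choose_preferred_id_alt (values : List (Option String)) : Option String :=
  let st := values.foldl pvAltStep ((PySem.Set.empty : PySem.Set String), none, none)
  match st.2.2 with
  | some b => some b.2
  | none => st.2.1

-- ===== PRECONDITION & SPEC =====
def Spec_choose_preferred_id (values : List (Option String)) (out : Option String) : Prop := out = choose_preferred_id_alt values
instance (values : List (Option String)) (out : Option String) : Decidable (Spec_choose_preferred_id values out) := by unfold Spec_choose_preferred_id; infer_instance

-- ===== CLAIM (what is proved, stated in full; the proofs are below) =====
def Claim_equal_choose_preferred_id : Prop := ∀ (values : List (Option String)), Dom_choose_preferred_id values → Spec_choose_preferred_id values (choose_preferred_id values)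

-- ===== LEMMAS AND PROOFS =====

-- B's (last_unique, best) update, as a fold step over the unique values only
def pvF2 (lb : Option String × Option (Int × String)) (v : String) :
    Option String × Option (Int × String) :=
  (some v, pvBestUpd lb.2 v)

-- the fold step of PySem.List.max? with key item.1 (Python's first-maximum rule)
def pvMaxStep (acc : Option (Int × String)) (x : Int × String) : Option (Int × String) :=
  match acc with
  | none => some x
  | some m => if m.1 < x.1 then some x else some m

-- accumulator lemma for A's unique list
theorem pvUniq_acc (values : List (Option String)) :
    ∀ (se : PySem.Set String) (un : List String),
    List.foldl pvUniqStep (se, un) values =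
      ((List.foldl pvUniqStep (se, []) values).1,
        un ++ (List.foldl pvUniqStep (se, []) values).2) := by
  induction values with
  | nil => intro se un; simp
  | cons v rest ih =>
    intro se un
    match v with
    | none => simpa only [List.foldl_cons, pvUniqStep] using ih se un
    | some s =>
      by_cases h : PySem.Set.contains se s = true
      · simp only [List.foldl_cons, pvUniqStep, if_pos h]
        exact ih se un
      · simp only [List.foldl_cons, pvUniqStep, if_neg h]
        rw [ih (PySem.Set.add se s) (un ++ [s])]
        simp only [List.nil_append]
        rw [ih (PySem.Set.add se s) [s]]
        simp

-- accumulator lemma for A's numeric-pairs list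
theorem pvNum_acc (U : List String) :
    ∀ (acc : List (Int × String)),
    List.foldl pvNumStep acc U = acc ++ List.foldl pvNumStep [] U := by
  induction U with
  | nil => intro acc; simp
  | cons v rest ih =>
    intro acc
    cases h : PySem.Int.ofStr? v with
    | none => simp only [List.foldl_cons, pvNumStep, h]; exact ih acc
    | some n =>
      simp only [List.foldl_cons, pvNumStep, h]
      rw [ih (acc ++ [(n, v)])]
      simp only [List.nil_append]
      rw [ih [(n, v)]]
      simp

-- B's fold over all values = pvF2 folded over A's unique list
theorem pvAlt_eq_f2 (values : List (Option String)) :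
    ∀ (se : PySem.Set String) (l : Option String) (b : Option (Int × String)),
    (List.foldl pvAltStep (se, l, b) values).2 =
      List.foldl pvF2 (l, b) (List.foldl pvUniqStep (se, []) values).2 := by
  induction values with
  | nil => intro se l b; simp
  | cons v rest ih =>
    intro se l b
    match v with
    | none => simpa only [List.foldl_cons, pvAltStep, pvUniqStep] using ih se l b
    | some s =>
      by_cases h : PySem.Set.contains se s = true
      · simp only [List.foldl_cons, pvAltStep, pvUniqStep, if_pos h]
        exact ih se l b
      · simp only [List.foldl_cons, pvAltStep, pvUniqStep, if_neg h]
        rw [ih (PySem.Set.add se s) (some s) (pvBestUpd b s)]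
        simp only [List.nil_append]
        rw [pvUniq_acc rest (PySem.Set.add se s) [s]]
        simp [pvF2]

-- the first component of the pvF2 fold is the last unique value
theorem pvF2_fst (U : List String) :
    ∀ (l : Option String) (b : Option (Int × String)),
    (List.foldl pvF2 (l, b) U).1 = U.getLast?.or l := by
  induction U with
  | nil => intro l b; simp
  | cons v rest ih =>
    intro l b
    simp only [List.foldl_cons, pvF2]
    rw [ih (some v) (pvBestUpd b v)]
    cases rest with
    | nil => simp
    | cons w t =>
      obtain ⟨x, hx⟩ := Option.isSome_iff_exists.mp
        (by simp : ((w :: t).getLast?).isSome)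
      simp [List.getLast?_cons_cons, hx]

-- the second component of the pvF2 fold is the first-maximum fold over the numeric pairs
theorem pvF2_snd (U : List String) :
    ∀ (l : Option String) (b : Option (Int × String)),
    (List.foldl pvF2 (l, b) U).2 =
      List.foldl pvMaxStep b (List.foldl pvNumStep [] U) := by
  induction U with
  | nil => intro l b; simp
  | cons v rest ih =>
    intro l b
    simp only [List.foldl_cons, pvF2]
    rw [ih (some v) (pvBestUpd b v), pvNum_acc rest (pvNumStep [] v)]
    cases h : PySem.Int.ofStr? v with
    | none => simp [pvNumStep, h, pvBestUpd]
    | some n =>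
      simp only [pvNumStep, h, List.nil_append, List.singleton_append, List.foldl_cons]
      congr 1
      cases b with
      | none => simp [pvBestUpd, h, pvMaxStep]
      | some m =>
        simp only [pvBestUpd, h, pvMaxStep, gt_iff_lt]

-- PySem.List.max? with key item.1 is the pvMaxStep fold
theorem pvMax?_eq (xs : List (Int × String)) :
    PySem.List.max? xs (fun item => item.1) = List.foldl pvMaxStep none xs := by
  simp only [PySem.List.max?]
  congr 1
  funext acc x
  cases acc <;> rfl

-- a pvMaxStep fold started from some value stays some
theorem pvMaxStep_isSome (l : List (Int × String)) :
    ∀ (m : Int × String), (List.foldl pvMaxStep (some m) l).isSome := by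
  induction l with
  | nil => intro m; simp
  | cons x t ih =>
    intro m
    simp only [List.foldl_cons, pvMaxStep]
    by_cases h : m.1 < x.1
    · simp only [if_pos h]; exact ih x
    · simp only [if_neg h]; exact ih m

-- xs[-1] on a nonempty list is its last element
theorem pvGet_neg_one (xs : List String) (h : xs ≠ []) :
    PySem.List.pyGet? xs (-1) = xs.getLast? := by
  have hlen : 0 < xs.length := List.length_pos_iff.mpr h
  rw [List.getLast?_eq_getElem?]
  simp only [PySem.List.pyGet?, PySem.List.pyIdx?]
  have hneg : ¬ (0:Int) ≤ -1 := by norm_num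
  have hle : -(xs.length:Int) ≤ -1 := by omega
  simp [hneg, hle]

-- ===== VERDICT (by name: the statement is the Claim_ definition above) =====
theorem choose_preferred_id_spec : Claim_equal_choose_preferred_id := by
  intro values _
  unfold Spec_choose_preferred_id
  simp only [choose_preferred_id, choose_preferred_id_alt]
  rw [pvAlt_eq_f2 values PySem.Set.empty none none]
  rw [pvF2_snd _ none none, pvF2_fst _ none none, pvMax?_eq]
  generalize (List.foldl pvUniqStep ((PySem.Set.empty : PySem.Set String), ([] : List String)) values).2 = U
  rcases U with _ | ⟨u, us⟩
  · simp
  · have hne : u :: us ≠ ([] : List String) := by simp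
    rcases hnum : List.foldl pvNumStep [] (u :: us) with _ | ⟨p, ps⟩
    · -- no numeric values: both return the last unique value
      simp only [hnum, if_neg hne, ne_eq, not_true_eq_false, if_false, List.foldl_nil]
      rw [pvGet_neg_one _ hne]
      simp
    · -- numeric values nonempty: both return Python's max by int value
      obtain ⟨it, hit⟩ := Option.isSome_iff_exists.mp
        (by simpa only [List.foldl_cons, pvMaxStep] using pvMaxStep_isSome ps p :
          (List.foldl pvMaxStep none (p :: ps)).isSome)
      simp [hnum, hne, hit]
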